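-- pv_equiv track=rewrite | github.com/sharmaabhijith/MIA_SNN | calc_th_with_c.py | thrs_in_out
-- ===== SOURCE A (Python) =====
-- def thrs_in_out(arr, idx_list):
--
--     thrs_in = []
--
--     thrs_out = []
--
--     # idx_list = [0]+idx_list
--
--     thrs_list = []
--
--     for idx in range(0,len(idx_list)):
--
--         if idx%2==0:
--
--             if idx==0:
--
--                 thrs_in.append(arr[idx_list[idx]+1])
--
--             else:
--
--                 thrs_in.append(arr[idx_list[idx]+1]-arr[idx_list[idx-1]+1])
--
--
--
--         else:
--
--             if idx ==1:
--
--                 thrs_out.append(arr[idx_list[idx]+1])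
--
--             else:
--
--                 thrs_out.append(arr[idx_list[idx]+1]-arr[idx_list[idx-2]+1])
--
--
--
--     return thrs_in, thrs_out
-- ===== SOURCE B (Python) =====
-- def thrs_in_out(arr, idx_list):
--     # Both of A's difference branches subtract the value at the previous odd
--     # position, so one pass consuming pairs with a single carried value suffices.
--     thrs_in, thrs_out = [], []
--     prev = None
--     it = iter(idx_list)
--     for j in it:
--         e = arr[j + 1]
--         thrs_in.append(e if prev is None else e - prev)
--         k = next(it, None)
--         if k is None:
--             break
--         o = arr[k + 1]
--         thrs_out.append(o if prev is None else o - prev)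
--         prev = o
--     return thrs_in, thrs_out
-- ===== Notes on version B (the rewrite author's own statement) =====
-- stated objective: simpler
-- what changed: Replaces A's index loop with parity tests and idx-1/idx-2 re-indexing into idx_list by a single pass that consumes the index list two elements at a time, carrying only the previous odd-position value (which is what both of A's difference branches subtract), with no parity tests or index arithmetic.
import Mathlib
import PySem

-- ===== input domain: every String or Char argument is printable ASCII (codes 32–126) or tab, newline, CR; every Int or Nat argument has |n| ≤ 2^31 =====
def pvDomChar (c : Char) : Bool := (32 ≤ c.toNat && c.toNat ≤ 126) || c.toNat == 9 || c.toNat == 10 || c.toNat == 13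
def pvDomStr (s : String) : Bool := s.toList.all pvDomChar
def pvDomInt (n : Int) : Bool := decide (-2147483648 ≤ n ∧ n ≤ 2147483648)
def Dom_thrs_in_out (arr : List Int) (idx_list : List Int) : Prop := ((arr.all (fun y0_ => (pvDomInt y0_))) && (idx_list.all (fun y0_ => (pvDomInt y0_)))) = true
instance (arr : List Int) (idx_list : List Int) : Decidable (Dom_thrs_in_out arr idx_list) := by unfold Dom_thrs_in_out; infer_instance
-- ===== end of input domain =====

-- B consumes the index list two elements at a time in one pass, carrying only the
-- previous odd-position value that both of A's difference branches subtract
-- (objective: simpler — no parity tests, no idx-1/idx-2 re-indexing).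

-- ===== PORT A =====
-- the body of A's for-loop (state = (thrs_in, thrs_out), idx the loop counter)
def pvStepA (arr : List Int) (idx_list : List Int) (st : List Int × List Int) (idx : Int) :
    List Int × List Int :=
  if PySem.Int.mod idx 2 == 0 then
    if idx == 0 then
      (st.1 ++ [PySem.List.pyGetD arr (PySem.List.pyGetD idx_list idx 0 + 1) 0], st.2)
    else
      (st.1 ++ [PySem.List.pyGetD arr (PySem.List.pyGetD idx_list idx 0 + 1) 0
                - PySem.List.pyGetD arr (PySem.List.pyGetD idx_list (idx - 1) 0 + 1) 0], st.2)
  else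
    if idx == 1 then
      (st.1, st.2 ++ [PySem.List.pyGetD arr (PySem.List.pyGetD idx_list idx 0 + 1) 0])
    else
      (st.1, st.2 ++ [PySem.List.pyGetD arr (PySem.List.pyGetD idx_list idx 0 + 1) 0
                - PySem.List.pyGetD arr (PySem.List.pyGetD idx_list (idx - 2) 0 + 1) 0])

def thrs_in_out (arr : List Int) (idx_list : List Int) : List Int × List Int :=
  (PySem.List.pyRange 0 (idx_list.length : Int) 1).foldl (pvStepA arr idx_list) ([], [])

-- ===== PORT B =====
-- 'e if prev is None else e - prev'
def pvSubB (prev : Option Int) (x : Int) : Int :=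
  match prev with
  | none => x
  | some q => x - q

-- B's loop: pull j (and possibly k) from the iterator, append, carry prev = o
def pvLoopB (arr : List Int) : List Int → Option Int → List Int → List Int →
    List Int × List Int
  | [], _, tin, tout => (tin, tout)
  | [j], prev, tin, tout =>
      (tin ++ [pvSubB prev (PySem.List.pyGetD arr (j + 1) 0)], tout)
  | j :: k :: rest, prev, tin, tout =>
      let e := PySem.List.pyGetD arr (j + 1) 0
      let o := PySem.List.pyGetD arr (k + 1) 0
      pvLoopB arr rest (some o) (tin ++ [pvSubB prev e]) (tout ++ [pvSubB prev o])

def thrs_in_out_alt (arr : List Int) (idx_list : List Int) : List Int × List Int :=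
  pvLoopB arr idx_list none [] []

-- ===== PRECONDITION & SPEC =====
-- Pre_: Python A raises IndexError exactly when some j in idx_list has arr index j+1 out of range
def Pre_thrs_in_out (arr : List Int) (idx_list : List Int) : Prop :=
  ∀ j ∈ idx_list, PySem.Raise.InRange arr.length (j + 1)
instance (arr : List Int) (idx_list : List Int) : Decidable (Pre_thrs_in_out arr idx_list) := by
  unfold Pre_thrs_in_out; infer_instance
def pvWitness_thrs_in_out : List Int × List Int := ([5, 7], [0, -2])

def Spec_thrs_in_out (arr : List Int) (idx_list : List Int) (out : List Int × List Int) : Prop :=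
  out = thrs_in_out_alt arr idx_list
instance (arr : List Int) (idx_list : List Int) (out : List Int × List Int) :
    Decidable (Spec_thrs_in_out arr idx_list out) := by unfold Spec_thrs_in_out; infer_instance

-- ===== CLAIM (what is proved, stated in full; the proofs are below) =====
def Claim_equal_thrs_in_out : Prop := ∀ (arr : List Int) (idx_list : List Int),
  Dom_thrs_in_out arr idx_list → Pre_thrs_in_out arr idx_list →
  Spec_thrs_in_out arr idx_list (thrs_in_out arr idx_list)

-- ===== LEMMAS AND PROOFS =====

-- the value A reads at loop position i (with pyGetD's defaults, matching the port)
def pvG (arr : List Int) (idx_list : List Int) (i : Int) : Int :=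
  PySem.List.pyGetD arr (PySem.List.pyGetD idx_list i 0 + 1) 0

lemma pvStepA_zero (arr l : List Int) (st : List Int × List Int) :
    pvStepA arr l st 0 = (st.1 ++ [pvG arr l 0], st.2) := by
  simp only [pvStepA, pvG]; norm_num

lemma pvStepA_one (arr l : List Int) (st : List Int × List Int) :
    pvStepA arr l st 1 = (st.1, st.2 ++ [pvG arr l 1]) := by
  simp only [pvStepA, pvG]
  rw [if_neg (by decide), if_pos (by decide)]

lemma pvStepA_even (arr l : List Int) (st : List Int × List Int) (idx : Int)
    (hm : PySem.Int.mod idx 2 = 0) (h0 : idx ≠ 0) :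
    pvStepA arr l st idx = (st.1 ++ [pvG arr l idx - pvG arr l (idx - 1)], st.2) := by
  simp only [pvStepA, pvG, hm]
  rw [if_pos (by norm_num), if_neg (by simpa using h0)]

lemma pvStepA_odd (arr l : List Int) (st : List Int × List Int) (idx : Int)
    (hm : PySem.Int.mod idx 2 = 1) (h1 : idx ≠ 1) :
    pvStepA arr l st idx = (st.1, st.2 ++ [pvG arr l idx - pvG arr l (idx - 2)]) := by
  simp only [pvStepA, pvG, hm]
  rw [if_neg (by norm_num), if_neg (by simpa using h1)]

-- range(a, k+1, 2) gains k exactly when a ≤ k and k has a's parity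
lemma pvRange2_append (a : Int) (k : Nat) (h : a ≤ (k : Int)) (h0 : 0 ≤ a)
    (hp : ((k : Int) - a) % 2 = 0) :
    PySem.List.pyRange a ((k + 1 : Nat) : Int) 2 =
    PySem.List.pyRange a (k : Int) 2 ++ [(k : Int)] := by
  rw [PySem.List.pyRange_of_pos _ _ (by norm_num), PySem.List.pyRange_of_pos _ _ (by norm_num)]
  rw [if_pos (by push_cast; omega)]
  by_cases h2 : a < (k : Int)
  · rw [if_pos h2]
    have hlb : ((((k + 1 : Nat) : Int) - a + 2 - 1) / 2).toNat = (((k : Int) - a + 2 - 1) / 2).toNat + 1 := by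
      push_cast; omega
    rw [hlb, List.range_succ, List.map_append]
    congr 1
    simp only [List.map_cons, List.map_nil]
    congr 1
    omega
  · rw [if_neg h2]
    have ha : a = (k : Int) := by omega
    subst ha
    have : ((((k + 1 : Nat) : Int) - k + 2 - 1) / 2).toNat = 1 := by push_cast; omega
    rw [this]
    simp

lemma pvRange2_same (a : Int) (k : Nat) (h0 : 0 ≤ a)
    (hp : (k : Int) < a ∨ ((k : Int) - a) % 2 = 1) :
    PySem.List.pyRange a ((k + 1 : Nat) : Int) 2 =
    PySem.List.pyRange a (k : Int) 2 := by
  rw [PySem.List.pyRange_of_pos _ _ (by norm_num), PySem.List.pyRange_of_pos _ _ (by norm_num)]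
  by_cases h2 : a < (k : Int)
  · rw [if_pos h2, if_pos (by push_cast; omega)]
    congr 2
    push_cast; omega
  · rw [if_neg h2]
    by_cases h1 : a < ((k + 1 : Nat) : Int)
    · have ha : a = (k : Int) := by push_cast at h1; omega
      subst ha
      rcases hp with h | h <;> omega
    · rw [if_neg h1]

-- loop invariant of A's fold
lemma pvFoldA (arr idx_list : List Int) (k : Nat) :
    (PySem.List.pyRange 0 (k : Int) 1).foldl (pvStepA arr idx_list) ([], []) =
    ((if k = 0 then [] else [pvG arr idx_list 0]) ++
       (PySem.List.pyRange 2 (k : Int) 2).map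
         (fun i => pvG arr idx_list i - pvG arr idx_list (i - 1)),
     (if k ≤ 1 then [] else [pvG arr idx_list 1]) ++
       (PySem.List.pyRange 3 (k : Int) 2).map
         (fun i => pvG arr idx_list i - pvG arr idx_list (i - 2))) := by
  induction k with
  | zero => simp [PySem.List.pyRange_of_pos]
  | succ k ih =>
    have hsplit : PySem.List.pyRange 0 ((k + 1 : Nat) : Int) 1 =
        PySem.List.pyRange 0 (k : Int) 1 ++ [(k : Int)] := by
      push_cast
      exact PySem.List.pyRange_one_succ_right (by exact_mod_cast Nat.zero_le k)
    rw [hsplit, List.foldl_append, ih]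
    simp only [List.foldl_cons, List.foldl_nil]
    have hmod : PySem.Int.mod (k : Int) 2 = ((k % 2 : Nat) : Int) := by
      exact_mod_cast PySem.Int.mod_natCast k 2
    rcases Nat.even_or_odd k with he | ho
    · have hm : k % 2 = 0 := Nat.even_iff.mp he
      rcases Nat.eq_zero_or_pos k with h0 | hpos
      · subst h0
        rw [show ((0 : Nat) : Int) = 0 by norm_num, pvStepA_zero]
        rw [pvRange2_same 2 0 (by norm_num) (by left; norm_num),
            pvRange2_same 3 0 (by norm_num) (by left; norm_num)]
        simp [PySem.List.pyRange_of_pos]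
      · have hk2 : 2 ≤ k := by omega
        rw [pvStepA_even arr idx_list _ (k : Int) (by rw [hmod, hm]; norm_num) (by omega)]
        rw [pvRange2_append 2 k (by exact_mod_cast hk2) (by norm_num) (by omega),
            pvRange2_same 3 k (by norm_num) (by right; omega), List.map_append]
        simp only [List.map_cons, List.map_nil]
        rw [if_neg (by omega), if_neg (by omega), if_neg (by omega), if_neg (by omega)]
        simp
    · have hm : k % 2 = 1 := Nat.odd_iff.mp ho
      by_cases h1 : k = 1
      · subst h1
        rw [show ((1 : Nat) : Int) = 1 by norm_num, pvStepA_one]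
        rw [pvRange2_same 2 1 (by norm_num) (by right; omega),
            pvRange2_same 3 1 (by norm_num) (by left; norm_num)]
        simp [PySem.List.pyRange_of_pos]
      · have hk3 : 3 ≤ k := by omega
        rw [pvStepA_odd arr idx_list _ (k : Int) (by rw [hmod, hm]; norm_num) (by omega)]
        rw [pvRange2_same 2 k (by norm_num) (by right; omega),
            pvRange2_append 3 k (by exact_mod_cast hk3) (by norm_num) (by omega), List.map_append]
        simp only [List.map_cons, List.map_nil]
        rw [if_neg (by omega), if_neg (by omega), if_neg (by omega), if_neg (by omega)]
        simp

-- dropping two leading elements shifts pvG's index by 2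
lemma pvG_cons2 (arr : List Int) (j k : Int) (rest : List Int) (i : Int)
    (h2 : 2 ≤ i) (hlt : i < (rest.length : Int) + 2) :
    pvG arr (j :: k :: rest) i = pvG arr rest (i - 2) := by
  unfold pvG
  congr 2
  rw [PySem.List.pyGetD_eq_getElem _ _ (by omega) (by simp; omega),
      PySem.List.pyGetD_eq_getElem _ _ (by omega) (by omega)]
  have hi : i.toNat = (i - 2).toNat + 2 := by omega
  simp [hi]

-- range(a, m+2, 2) = optional leading a, then range(a, m, 2) shifted by 2
lemma pvRange2_shift (a : Int) (m : Nat) (_ha : 2 ≤ a) :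
    PySem.List.pyRange a ((m : Int) + 2) 2 =
    (if (m : Int) + 2 ≤ a then [] else [a]) ++
      (PySem.List.pyRange a (m : Int) 2).map (· + 2) := by
  rw [PySem.List.pyRange_of_pos _ _ (by norm_num), PySem.List.pyRange_of_pos _ _ (by norm_num)]
  by_cases h1 : a < (m : Int) + 2
  · rw [if_pos h1, if_neg (by omega)]
    by_cases h2 : a < (m : Int)
    · rw [if_pos h2]
      have hN : (((m : Int) + 2 - a + 2 - 1) / 2).toNat = (((m : Int) - a + 2 - 1) / 2).toNat + 1 := by
        omega
      rw [hN, List.range_succ_eq_map]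
      simp only [List.map_cons, List.map_map]
      congr 1
      · omega
      · apply List.map_congr_left
        intro x _
        simp [Nat.succ_eq_add_one]
        ring
    · rw [if_neg h2]
      have hN : (((m : Int) + 2 - a + 2 - 1) / 2).toNat = 1 := by omega
      rw [hN]
      simp
  · rw [if_neg h1, if_pos (by omega), if_neg (by omega)]
    simp

-- closed form of B's loop (accumulators and carried value generalized)
lemma pvLoopB_closed (arr : List Int) (l : List Int) (p : Option Int)
    (tin tout : List Int) :
    pvLoopB arr l p tin tout =
    (tin ++ (if l.length = 0 then [] else [pvSubB p (pvG arr l 0)]) ++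
       (PySem.List.pyRange 2 (l.length : Int) 2).map
         (fun i => pvG arr l i - pvG arr l (i - 1)),
     tout ++ (if l.length ≤ 1 then [] else [pvSubB p (pvG arr l 1)]) ++
       (PySem.List.pyRange 3 (l.length : Int) 2).map
         (fun i => pvG arr l i - pvG arr l (i - 2))) := by
  induction l, p, tin, tout using pvLoopB.induct arr with
  | case1 p tin tout =>
    simp [pvLoopB, PySem.List.pyRange_of_pos]
  | case2 j p tin tout =>
    simp only [pvLoopB, List.length_cons, List.length_nil]
    rw [show ((0 + 1 : Nat) : Int) = 1 by norm_num]
    rw [PySem.List.pyRange_of_pos _ _ (by norm_num), PySem.List.pyRange_of_pos _ _ (by norm_num)]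
    rw [if_neg (by norm_num), if_neg (by norm_num), if_pos (by norm_num), if_neg (by norm_num)]
    simp [pvG, PySem.List.pyGetD]
  | case3 j k rest p tin tout e o ih =>
    simp only [pvLoopB]
    rw [ih]
    have he : e = PySem.List.pyGetD arr (j + 1) 0 := rfl
    have ho : o = PySem.List.pyGetD arr (k + 1) 0 := rfl
    have hlen : ((rest.length + 1 + 1 : Nat) : Int) = (rest.length : Int) + 2 := by push_cast; ring
    have hG0 : pvG arr (j :: k :: rest) 0 = PySem.List.pyGetD arr (j + 1) 0 := by
      simp [pvG, PySem.List.pyGetD]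
    have hG1 : pvG arr (j :: k :: rest) 1 = PySem.List.pyGetD arr (k + 1) 0 := by
      simp [pvG, PySem.List.pyGetD]
    rw [Prod.mk.injEq]
    constructor
    · -- thrs_in component
      simp only [List.length_cons, hlen]
      rw [pvRange2_shift 2 rest.length (by norm_num), List.map_append, List.map_map]
      by_cases hm : rest.length = 0
      · simp only [if_pos hm, if_neg (show ¬ rest.length + 1 + 1 = 0 by omega),
                   if_pos (show ((rest.length : Int)) + 2 ≤ 2 by omega)]
        simp [hm, hG0, he, PySem.List.pyRange_of_pos]
      · simp only [if_neg hm, if_neg (show ¬ rest.length + 1 + 1 = 0 by omega),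
                   if_neg (show ¬ ((rest.length : Int)) + 2 ≤ 2 by omega)]
        have h2 : pvG arr (j :: k :: rest) 2 - pvG arr (j :: k :: rest) (2 - 1) =
            pvSubB (some o) (pvG arr rest 0) := by
          rw [pvG_cons2 arr j k rest 2 (by norm_num) (by omega)]
          rw [show (2:Int) - 1 = 1 by norm_num, hG1]
          simp [pvSubB, ho]
        have hmap : (PySem.List.pyRange 2 (rest.length : Int) 2).map
            ((fun i => pvG arr (j :: k :: rest) i - pvG arr (j :: k :: rest) (i - 1)) ∘ (· + 2)) =
            (PySem.List.pyRange 2 (rest.length : Int) 2).map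
            (fun i => pvG arr rest i - pvG arr rest (i - 1)) := by
          apply List.map_congr_left
          intro i hi
          rw [PySem.List.mem_pyRange_iff_of_pos (by norm_num)] at hi
          simp only [Function.comp]
          rw [pvG_cons2 arr j k rest (i + 2) (by omega) (by omega),
              show i + 2 - 1 = (i - 1) + 2 by ring,
              pvG_cons2 arr j k rest ((i - 1) + 2) (by omega) (by omega)]
          congr 1 <;> congr 1 <;> omega
        rw [hmap, List.map_cons, List.map_nil, h2, hG0]
        simp [he]
    · -- thrs_out component
      simp only [List.length_cons, hlen]
      rw [pvRange2_shift 3 rest.length (by norm_num), List.map_append, List.map_map]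
      by_cases hm : rest.length ≤ 1
      · simp only [if_pos hm, if_neg (show ¬ rest.length + 1 + 1 ≤ 1 by omega),
                   if_pos (show ((rest.length : Int)) + 2 ≤ 3 by omega)]
        interval_cases h : rest.length
        · simp [show rest = [] from List.eq_nil_of_length_eq_zero h, ho,
                PySem.List.pyRange_of_pos, pvG, PySem.List.pyGetD]
        · simp [hG1, ho, PySem.List.pyRange_of_pos]
      · simp only [if_neg hm, if_neg (show ¬ rest.length + 1 + 1 ≤ 1 by omega),
                   if_neg (show ¬ ((rest.length : Int)) + 2 ≤ 3 by omega)]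
        have h3 : pvG arr (j :: k :: rest) 3 - pvG arr (j :: k :: rest) (3 - 2) =
            pvSubB (some o) (pvG arr rest 1) := by
          rw [pvG_cons2 arr j k rest 3 (by norm_num) (by omega)]
          rw [show (3:Int) - 2 = 1 by norm_num, hG1]
          simp [pvSubB, ho]
        have hmap : (PySem.List.pyRange 3 (rest.length : Int) 2).map
            ((fun i => pvG arr (j :: k :: rest) i - pvG arr (j :: k :: rest) (i - 2)) ∘ (· + 2)) =
            (PySem.List.pyRange 3 (rest.length : Int) 2).map
            (fun i => pvG arr rest i - pvG arr rest (i - 2)) := by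
          apply List.map_congr_left
          intro i hi
          rw [PySem.List.mem_pyRange_iff_of_pos (by norm_num)] at hi
          simp only [Function.comp]
          rw [pvG_cons2 arr j k rest (i + 2) (by omega) (by omega),
              show i + 2 - 2 = (i - 2) + 2 by ring,
              pvG_cons2 arr j k rest ((i - 2) + 2) (by omega) (by omega)]
          congr 1 <;> congr 1 <;> omega
        rw [hmap, List.map_cons, List.map_nil, h3, hG1]
        simp [ho]

lemma pvEq (arr idx_list : List Int) : thrs_in_out arr idx_list = thrs_in_out_alt arr idx_list := by
  rw [thrs_in_out, pvFoldA arr idx_list idx_list.length,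
      thrs_in_out_alt, pvLoopB_closed]
  simp [pvSubB]

-- ===== VERDICT (by name: the statement is the Claim_ definition above) =====
theorem thrs_in_out_spec : Claim_equal_thrs_in_out := by
  intro arr idx_list _ _
  exact pvEq arr idx_list
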